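-- pv_equiv track=rewrite | github.com/hoxbro/holoviz-tools | scripts/changelog.py | format_contributors
-- ===== SOURCE A (Python) =====
-- ME = "hoxbro"
--
-- def sort_contributors(contributors_set, new_contributors_set):
--     # Separate new and existing contributors
--     new_users = [user for user in contributors_set if user in new_contributors_set and user != ME]
--     existing_users = [
--         user for user in contributors_set if user not in new_contributors_set and user != ME
--     ]
--
--     new_users_sorted = sorted(new_users, key=lambda x: x.lower())
--     existing_users_sorted = sorted(existing_users, key=lambda x: x.lower())
--
--     result = new_users_sorted + existing_users_sorted
--     if ME in contributors_set:
--         result.append(ME)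
--
--     return result
--
-- def format_contributors(contributors, new_contributors):
--     """
--     Format contributors section with proper sorting and first contribution notes.
--
--     Args:
--         contributors: set of all contributor usernames
--         new_contributors: set of new contributor usernames
--         repo_name: repository name (e.g., "panel", "holoviews")
--
--     Returns:
--         str: Formatted contributor text
--     """
--
--     sorted_contributors = sort_contributors(contributors, new_contributors)
--
--     # Build contributors text
--     contributor_text = "Many thanks to "
--     contributor_mentions = []
--     for user in sorted_contributors:
--         if user in new_contributors:
--             contributor_mentions.append(
--                 f"[@{user}](https://github.com/{user}) (first contribution)"
--             )
--         else:
--             contributor_mentions.append(f"[@{user}](https://github.com/{user})")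
--
--     if len(contributor_mentions) > 1:
--         contributor_text += (
--             ", ".join(contributor_mentions[:-1])
--             + f", and {contributor_mentions[-1]} for their contributions."
--         )
--     elif len(contributor_mentions) == 1:
--         contributor_text += f"{contributor_mentions[0]} for their contributions."
--     else:
--         contributor_text = "No contributors found."
--
--     return contributor_text
-- ===== SOURCE B (Python) =====
-- ME = "hoxbro"
--
--
-- def format_contributors(contributors, new_contributors):
--     # One keyed sort: new contributors first, existing next, ME always last,
--     # each block ordered case-insensitively.
--     ordered = sorted(
--         contributors,
--         key=lambda u: (2 if u == ME else 1 - (u in new_contributors), u.lower()),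
--     )
--     mentions = [
--         f"[@{u}](https://github.com/{u}) (first contribution)"
--         if u in new_contributors
--         else f"[@{u}](https://github.com/{u})"
--         for u in ordered
--     ]
--     if not mentions:
--         return "No contributors found."
--     *init, last = mentions
--     if init:
--         return f"Many thanks to {', '.join(init)}, and {last} for their contributions."
--     return f"Many thanks to {last} for their contributions."
-- ===== Notes on version B (the rewrite author's own statement) =====
-- stated objective: simpler
-- what changed: Replaces A's helper that partitions contributors into new/existing lists, sorts each separately, concatenates and conditionally appends ME, by one stable sort under a composite key (group rank, lowercase name), with the mention list built by a comprehension and the join done by destructuring *init, last.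
import Mathlib
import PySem

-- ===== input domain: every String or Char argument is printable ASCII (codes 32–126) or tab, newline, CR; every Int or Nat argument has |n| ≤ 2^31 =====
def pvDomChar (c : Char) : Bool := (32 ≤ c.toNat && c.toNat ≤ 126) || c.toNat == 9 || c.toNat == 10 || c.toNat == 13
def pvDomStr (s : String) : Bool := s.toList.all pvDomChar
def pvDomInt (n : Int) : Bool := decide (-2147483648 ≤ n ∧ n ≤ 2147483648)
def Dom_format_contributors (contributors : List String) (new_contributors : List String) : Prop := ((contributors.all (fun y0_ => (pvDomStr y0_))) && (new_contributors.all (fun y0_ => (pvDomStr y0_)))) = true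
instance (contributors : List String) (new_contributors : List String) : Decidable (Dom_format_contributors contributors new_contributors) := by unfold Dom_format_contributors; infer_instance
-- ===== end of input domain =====

-- B replaces A's partition-into-two-lists / two sorts / concat / append-ME by a single
-- stable sort under one composite key (group rank, lowercase name); objective: simpler.

-- ===== PORT A =====
def pvME : String := "hoxbro"

def sort_contributors (contributors_set : List String) (new_contributors_set : List String) : List String :=
  let new_users := contributors_set.filter (fun user => new_contributors_set.contains user && user != pvME)
  let existing_users := contributors_set.filter (fun user => !(new_contributors_set.contains user) && user != pvME)
  let new_users_sorted := PySem.List.sorted new_users (fun x => PySem.Str.lower x)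
  let existing_users_sorted := PySem.List.sorted existing_users (fun x => PySem.Str.lower x)
  let result := new_users_sorted ++ existing_users_sorted
  if contributors_set.contains pvME then result ++ [pvME] else result

def format_contributors (contributors : List String) (new_contributors : List String) : String :=
  let sorted_contributors := sort_contributors contributors new_contributors
  let contributor_text := "Many thanks to "
  let contributor_mentions := sorted_contributors.foldl
    (fun acc user =>
      if new_contributors.contains user then
        acc ++ ["[@" ++ user ++ "](https://github.com/" ++ user ++ ") (first contribution)"]
      else
        acc ++ ["[@" ++ user ++ "](https://github.com/" ++ user ++ ")"]) []
  if contributor_mentions.length > 1 then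
    contributor_text ++ PySem.Str.join ", " (PySem.List.slice contributor_mentions none (some (-1)))
      ++ ", and " ++ PySem.List.pyGetD contributor_mentions (-1) ""  -- guarded by length > 1, in range
      ++ " for their contributions."
  else if contributor_mentions.length == 1 then
    contributor_text ++ PySem.List.pyGetD contributor_mentions 0 "" ++ " for their contributions."
  else
    "No contributors found."

-- ===== PORT B =====
def pvRank (new_contributors : List String) (u : String) : Int :=
  if u == pvME then 2 else 1 - (if new_contributors.contains u then 1 else 0)

def format_contributors_alt (contributors : List String) (new_contributors : List String) : String :=
  let ordered := PySem.List.sorted2 contributors (pvRank new_contributors) (fun u => PySem.Str.lower u)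
  let mentions := ordered.map (fun u =>
    if new_contributors.contains u then
      "[@" ++ u ++ "](https://github.com/" ++ u ++ ") (first contribution)"
    else
      "[@" ++ u ++ "](https://github.com/" ++ u ++ ")")
  match mentions with
  | [] => "No contributors found."
  | m :: rest =>
    let last := (m :: rest).getLast (by simp)
    let init := (m :: rest).dropLast
    if init ≠ [] then
      "Many thanks to " ++ PySem.Str.join ", " init ++ ", and " ++ last ++ " for their contributions."
    else
      "Many thanks to " ++ last ++ " for their contributions."

-- ===== PRECONDITION & SPEC =====
-- Pre_ admits genuine set inputs (distinct contributor names) and excludes contributor sets holding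
-- two case-insensitively equal names in the same ordering group (both new or both existing, neither ME),
-- where A's output order is an accidental tie broken by Python's set-iteration (hash) order.
def Pre_format_contributors (contributors : List String) (new_contributors : List String) : Prop :=
  contributors.Nodup ∧
  ∀ u ∈ contributors, ∀ v ∈ contributors, u ≠ v → PySem.Str.lower u = PySem.Str.lower v →
    u = pvME ∨ v = pvME ∨ ¬ ((u ∈ new_contributors) ↔ (v ∈ new_contributors))
instance (contributors : List String) (new_contributors : List String) : Decidable (Pre_format_contributors contributors new_contributors) := by unfold Pre_format_contributors; infer_instance

def pvWitness_format_contributors : List String × List String := (["Alice", "bob", "hoxbro", "Carol"], ["bob", "dave"])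

def Spec_format_contributors (contributors : List String) (new_contributors : List String) (out : String) : Prop := out = format_contributors_alt contributors new_contributors
instance (contributors : List String) (new_contributors : List String) (out : String) : Decidable (Spec_format_contributors contributors new_contributors out) := by unfold Spec_format_contributors; infer_instance

-- ===== CLAIM (what is proved, stated in full; the proofs are below) =====
def Claim_equal_format_contributors : Prop := ∀ (contributors : List String) (new_contributors : List String), Dom_format_contributors contributors new_contributors → Pre_format_contributors contributors new_contributors → Spec_format_contributors contributors new_contributors (format_contributors contributors new_contributors)

-- ===== LEMMAS AND PROOFS =====

-- The composite key of B's single sort, as one lexicographic value.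
def pvKey (new_contributors : List String) (u : String) : Int ×ₗ String :=
  toLex (pvRank new_contributors u, PySem.Str.lower u)

-- sorted2 with keys (k1, k2) is sorted with the lexicographic key.
theorem pv_sorted2_eq_sorted_lex (xs : List String) (k1 : String → Int) (k2 : String → String) :
    PySem.List.sorted2 xs k1 k2 = PySem.List.sorted xs (fun x => toLex (k1 x, k2 x)) := by
  rw [PySem.List.sorted_eq_foldl_insertBy]
  simp only [PySem.List.sorted2, Bool.false_eq_true, if_false]
  have hb : (fun (a b : String) => decide (k1 a < k1 b) || (!decide (k1 b < k1 a) && decide (k2 a < k2 b)))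
      = (fun (a b : String) => decide (toLex (k1 a, k2 a) < toLex (k1 b, k2 b))) := by
    funext a b
    rcases lt_trichotomy (k1 a) (k1 b) with h|h|h <;>
      simp [Prod.Lex.toLex_lt_toLex, h, lt_asymm]
  rw [hb]

-- A's result list is a permutation of the input.
theorem pv_sortA_perm (cs ncs : List String) (h : cs.Nodup) :
    (sort_contributors cs ncs).Perm cs := by
  unfold sort_contributors
  simp only
  have hfilters : (cs.filter (fun user => ncs.contains user && user != pvME)
        ++ cs.filter (fun user => !(ncs.contains user) && user != pvME)).Perm
      (cs.filter (fun user => user != pvME)) := by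
    have h1 : cs.filter (fun user => ncs.contains user && user != pvME)
        = (cs.filter (fun user => user != pvME)).filter (fun user => ncs.contains user) := by
      rw [List.filter_filter]
    have h2 : cs.filter (fun user => !(ncs.contains user) && user != pvME)
        = (cs.filter (fun user => user != pvME)).filter (fun user => !(ncs.contains user)) := by
      rw [List.filter_filter]
    rw [h1, h2]
    exact List.filter_append_perm _ _
  have hsorted : ((PySem.List.sorted (cs.filter (fun user => ncs.contains user && user != pvME)) (fun x => PySem.Str.lower x))
      ++ (PySem.List.sorted (cs.filter (fun user => !(ncs.contains user) && user != pvME)) (fun x => PySem.Str.lower x))).Perm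
      (cs.filter (fun user => user != pvME)) :=
    ((PySem.List.sorted_perm _ _ _).append (PySem.List.sorted_perm _ _ _)).trans hfilters
  have hme : cs.Perm (cs.filter (fun user => user != pvME) ++ cs.filter (fun user => user == pvME)) := by
    have := List.filter_append_perm (fun user => user != pvME) cs
    have hc : cs.filter (fun user => !(user != pvME)) = cs.filter (fun user => user == pvME) :=
      List.filter_congr (fun u _ => by simp [bne])
    rw [hc] at this
    exact this.symm
  by_cases hmem : pvME ∈ cs
  · have hcont : cs.contains pvME = true := by simpa using hmem
    rw [if_pos hcont]
    have hfe : cs.filter (fun user => user == pvME) = [pvME] := by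
      rw [List.filter_beq pvME, List.count_eq_one_of_mem h hmem]
      rfl
    refine (List.Perm.append_right [pvME] hsorted).trans ?_
    rw [← hfe]
    exact hme.symm
  · have hcont : ¬ (cs.contains pvME = true) := by simpa using hmem
    rw [if_neg hcont]
    have hfe : cs.filter (fun user => user == pvME) = [] := by
      simp only [List.filter_eq_nil_iff]
      intro u hu
      simp only [beq_iff_eq]
      intro he
      exact hmem (he ▸ hu)
    refine hsorted.trans ?_
    have := hme.symm
    rw [hfe, List.append_nil] at this
    exact this

-- A's result list is strictly increasing under the composite key.
theorem pv_sortA_pairwise (cs ncs : List String) (hp : Pre_format_contributors cs ncs) :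
    (sort_contributors cs ncs).Pairwise (fun a b => pvKey ncs a < pvKey ncs b) := by
  obtain ⟨hnd, hlow⟩ := hp
  have hlex : ∀ a b : String, pvRank ncs a < pvRank ncs b → pvKey ncs a < pvKey ncs b := by
    intro a b hab
    simp only [pvKey, Prod.Lex.toLex_lt_toLex]
    exact Or.inl hab
  have hrank : ∀ u : String, u ≠ pvME → pvRank ncs u = 1 - (if ncs.contains u then 1 else 0) := by
    intro u hu
    simp [pvRank, hu]
  have hblock : ∀ (p : String → Bool), (∀ u, p u = true → u ≠ pvME) →
      (∀ u v, p u = true → p v = true → (ncs.contains u = ncs.contains v)) →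
      (PySem.List.sorted (cs.filter p) (fun x => PySem.Str.lower x)).Pairwise
        (fun a b => pvKey ncs a < pvKey ncs b) := by
    intro p hpME hpgrp
    have hmem : ∀ u ∈ PySem.List.sorted (cs.filter p) (fun x => PySem.Str.lower x),
        u ∈ cs ∧ p u = true := by
      intro u hu
      have := (PySem.List.mem_sorted _ _ _ _).mp hu
      exact ⟨(List.mem_filter.mp this).1, (List.mem_filter.mp this).2⟩
    have hndS : (PySem.List.sorted (cs.filter p) (fun x => PySem.Str.lower x)).Nodup :=
      ((PySem.List.sorted_perm _ _ _).nodup_iff).mpr (hnd.filter p)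
    have hord := PySem.List.sorted_pairwise (cs.filter p) (fun x => PySem.Str.lower x)
    refine List.Pairwise.imp_of_mem ?_ (hord.and hndS)
    intro a b ha hb hab
    obtain ⟨hale, hne⟩ := hab
    obtain ⟨hacs, hap⟩ := hmem a ha
    obtain ⟨hbcs, hbp⟩ := hmem b hb
    have haME := hpME a hap
    have hbME := hpME b hbp
    have hlowne : PySem.Str.lower a ≠ PySem.Str.lower b := by
      intro he
      rcases hlow a hacs b hbcs hne he with h | h | h
      · exact haME h
      · exact hbME h
      · exact h (by
          constructor <;> intro hx
          · exact (List.contains_iff_mem).mp ((hpgrp a b hap hbp) ▸ ((List.contains_iff_mem).mpr hx))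
          · exact (List.contains_iff_mem).mp ((hpgrp a b hap hbp).symm ▸ ((List.contains_iff_mem).mpr hx)))
    have hreq : pvRank ncs a = pvRank ncs b := by
      rw [hrank a haME, hrank b hbME, hpgrp a b hap hbp]
    simp only [pvKey, Prod.Lex.toLex_lt_toLex]
    exact Or.inr ⟨hreq, lt_of_le_of_ne hale hlowne⟩
  unfold sort_contributors
  simp only
  have hSN := hblock (fun user => ncs.contains user && user != pvME)
    (by intro u hu; simpa using (Bool.and_elim_right hu))
    (by intro u v hu hv
        simp only [Bool.and_eq_true] at hu hv
        rw [hu.1, hv.1])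
  have hSE := hblock (fun user => !(ncs.contains user) && user != pvME)
    (by intro u hu; simpa using (Bool.and_elim_right hu))
    (by intro u v hu hv
        simp only [Bool.and_eq_true, Bool.not_eq_true'] at hu hv
        rw [hu.1, hv.1])
  have hrankSN : ∀ a ∈ PySem.List.sorted (cs.filter (fun user => ncs.contains user && user != pvME))
      (fun x => PySem.Str.lower x), pvRank ncs a = 0 := by
    intro a ha
    have := (PySem.List.mem_sorted _ _ _ _).mp ha
    have h2 := (List.mem_filter.mp this).2
    simp only [Bool.and_eq_true, bne_iff_ne, ne_eq] at h2
    have h3 : a ∈ ncs := by simpa using h2.1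
    simp [pvRank, h2.2, h3]
  have hrankSE : ∀ a ∈ PySem.List.sorted (cs.filter (fun user => !(ncs.contains user) && user != pvME))
      (fun x => PySem.Str.lower x), pvRank ncs a = 1 := by
    intro a ha
    have := (PySem.List.mem_sorted _ _ _ _).mp ha
    have h2 := (List.mem_filter.mp this).2
    simp only [Bool.and_eq_true, Bool.not_eq_true', bne_iff_ne, ne_eq] at h2
    have h3 : a ∉ ncs := by simpa using h2.1
    simp [pvRank, h2.2, h3]
  have hcat : ((PySem.List.sorted (cs.filter (fun user => ncs.contains user && user != pvME))
        (fun x => PySem.Str.lower x)) ++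
      (PySem.List.sorted (cs.filter (fun user => !(ncs.contains user) && user != pvME))
        (fun x => PySem.Str.lower x))).Pairwise (fun a b => pvKey ncs a < pvKey ncs b) := by
    rw [List.pairwise_append]
    refine ⟨hSN, hSE, ?_⟩
    intro a ha b hb
    exact hlex a b (by rw [hrankSN a ha, hrankSE b hb]; norm_num)
  by_cases hcont : cs.contains pvME = true
  · rw [if_pos hcont]
    rw [List.pairwise_append]
    refine ⟨hcat, List.pairwise_singleton _ _, ?_⟩
    intro a ha b hb
    have hbME : b = pvME := by simpa using hb
    have hra : pvRank ncs a ≤ 1 := by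
      rcases List.mem_append.mp ha with h | h
      · rw [hrankSN a h]; norm_num
      · rw [hrankSE a h]
    refine hlex a b ?_
    rw [hbME]
    have : pvRank ncs pvME = 2 := by simp [pvRank]
    omega
  · rw [if_neg hcont]
    exact hcat

-- Hence the two orderings coincide.
theorem pv_sort_eq (cs ncs : List String) (hp : Pre_format_contributors cs ncs) :
    PySem.List.sorted2 cs (pvRank ncs) (fun u => PySem.Str.lower u) = sort_contributors cs ncs := by
  rw [pv_sorted2_eq_sorted_lex]
  exact PySem.List.sorted_eq_of_perm_of_pairwise_lt _ _ _
    (pv_sortA_perm cs ncs hp.1) (pv_sortA_pairwise cs ncs hp)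

-- ===== VERDICT (by name: the statement is the Claim_ definition above) =====
theorem format_contributors_spec : Claim_equal_format_contributors := by
  intro cs ncs hdom hpre
  unfold Spec_format_contributors format_contributors format_contributors_alt
  rw [pv_sort_eq cs ncs hpre]
  simp only
  have h1 : (sort_contributors cs ncs).foldl
      (fun acc user =>
        if ncs.contains user then
          acc ++ ["[@" ++ user ++ "](https://github.com/" ++ user ++ ") (first contribution)"]
        else
          acc ++ ["[@" ++ user ++ "](https://github.com/" ++ user ++ ")"]) []
      = (sort_contributors cs ncs).foldl
      (fun acc u => acc ++ [if ncs.contains u then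
          "[@" ++ u ++ "](https://github.com/" ++ u ++ ") (first contribution)"
        else
          "[@" ++ u ++ "](https://github.com/" ++ u ++ ")"]) [] :=
    PySem.List.foldl_congr_mem _ _ _ _ (by intro acc x _; by_cases h : x ∈ ncs <;> simp [h])
  rw [h1, PySem.List.foldl_append_singleton_eq_map, List.nil_append]
  generalize (sort_contributors cs ncs).map (fun u =>
      if ncs.contains u then
        "[@" ++ u ++ "](https://github.com/" ++ u ++ ") (first contribution)"
      else
        "[@" ++ u ++ "](https://github.com/" ++ u ++ ")") = ms
  rcases ms with _ | ⟨x, _ | ⟨y, t⟩⟩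
  · simp
  · simp [PySem.List.pyGetD_zero_cons]
  · have hne : (x :: y :: t) ≠ [] := by simp
    have hlen : (x :: y :: t).length > 1 := by simp
    rw [if_pos hlen, PySem.List.slice_to_neg_one, PySem.List.pyGetD_neg_one _ _ hne]
    simp [List.dropLast_cons₂]
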